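-- pv_equiv track=rewrite | github.com/rduivenvoorde/pdokservicesplugin | spider/spider.py | filter_get_records_responses
-- ===== SOURCE A (Python) =====
-- def filter_get_records_responses(get_record_results):
--     get_record_results = filter(
--         lambda x: "url" in x and x["url"], get_record_results
--     )  # filter out results without serviceurl
--     # delete duplicate service entries, some service endpoint have multiple service records
--     # so last record in get_record_results will be retained in case of duplicate
--     # since it will be inserted in new_dict last
--     new_dict = dict()
--     for obj in get_record_results:
--         new_dict[obj["url"]] = obj
--     return [value for _, value in new_dict.items()]
-- ===== SOURCE B (Python) =====
-- def filter_get_records_responses(get_record_results):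
--     records = list(get_record_results)
--     # pass 1: url -> last valid record carrying that url
--     last = {}
--     for obj in records:
--         if "url" in obj and obj["url"]:
--             last[obj["url"]] = obj
--     # pass 2: emit, at each url's first occurrence, the last record for it
--     result = []
--     seen = set()
--     for obj in records:
--         if "url" in obj and obj["url"]:
--             u = obj["url"]
--             if u not in seen:
--                 seen.add(u)
--                 result.append(last[u])
--     return result
-- ===== Notes on version B (the rewrite author's own statement) =====
-- stated objective: alternative
-- what changed: B separates ordering from values: one pass builds a url->last-record map, and a second pass over the materialized list with an explicit seen set emits, at each url's first occurrence, that map's record - instead of A's single pass that relies on dict insertion-order-with-overwrite semantics.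
import Mathlib
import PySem

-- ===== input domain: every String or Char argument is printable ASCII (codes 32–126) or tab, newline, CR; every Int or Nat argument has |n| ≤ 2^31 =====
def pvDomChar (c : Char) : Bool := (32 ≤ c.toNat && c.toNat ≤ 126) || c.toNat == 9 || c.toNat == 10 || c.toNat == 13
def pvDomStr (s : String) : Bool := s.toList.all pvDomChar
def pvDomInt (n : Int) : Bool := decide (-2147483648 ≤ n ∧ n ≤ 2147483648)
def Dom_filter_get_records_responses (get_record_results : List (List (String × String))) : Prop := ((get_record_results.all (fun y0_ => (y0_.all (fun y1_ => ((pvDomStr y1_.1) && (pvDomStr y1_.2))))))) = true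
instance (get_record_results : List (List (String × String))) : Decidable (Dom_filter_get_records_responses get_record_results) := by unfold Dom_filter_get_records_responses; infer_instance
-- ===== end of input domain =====

-- B replaces A's single dict-overwrite pass (output order = dict insertion order) by an explicit
-- order/value separation: a url→last-record map plus a seen-set pass emitting records in
-- first-occurrence order; same cost, different decomposition ('alternative').

-- ===== PORT A =====
-- Boundary: each Python record is a dict built from the generated pairs (last value wins,
-- first position kept) — modelled by PySem.Dict.ofList; records are returned as .items.
def pvRec (x : List (String × String)) : PySem.Dict String String := PySem.Dict.ofList x

-- Python's `"url" in x and x["url"]` (truthiness of a string = nonempty)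
def pvValid (x : PySem.Dict String String) : Bool :=
  x.contains "url" && !(x.getD "url" "" == "")

-- `obj["url"]`; the default "" is unreachable under pvValid (Python would raise KeyError there)
def pvKey (x : PySem.Dict String String) : String := x.getD "url" ""

def filter_get_records_responses (get_record_results : List (List (String × String))) : List (List (String × String)) :=
  let objs := (get_record_results.map pvRec).filter pvValid
  let newDict := objs.foldl (fun d obj => d.insert (pvKey obj) obj) PySem.Dict.empty
  newDict.values.map PySem.Dict.items

-- ===== PORT B =====
def filter_get_records_responses_alt (get_record_results : List (List (String × String))) : List (List (String × String)) :=
  let records := get_record_results.map pvRec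
  -- pass 1: url -> last valid record carrying that url
  let last := records.foldl
    (fun d obj => if pvValid obj then d.insert (pvKey obj) obj else d) PySem.Dict.empty
  -- pass 2: emit, at each url's first occurrence, `last`'s record for it
  let fin := records.foldl
    (fun acc obj =>
      if pvValid obj then
        if PySem.Set.contains acc.2 (pvKey obj) then acc
        else (acc.1 ++ [last.getD (pvKey obj) PySem.Dict.empty], PySem.Set.add acc.2 (pvKey obj))
      else acc)
    (([] : List (PySem.Dict String String)), ([] : PySem.Set String))
  fin.1.map PySem.Dict.items

-- ===== PRECONDITION & SPEC =====
def Spec_filter_get_records_responses (get_record_results : List (List (String × String))) (out : List (List (String × String))) : Prop := out = filter_get_records_responses_alt get_record_results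
instance (get_record_results : List (List (String × String))) (out : List (List (String × String))) : Decidable (Spec_filter_get_records_responses get_record_results out) := by unfold Spec_filter_get_records_responses; infer_instance

-- ===== CLAIM (what is proved, stated in full; the proofs are below) =====
def Claim_equal_filter_get_records_responses : Prop := ∀ (get_record_results : List (List (String × String))), Dom_filter_get_records_responses get_record_results → Spec_filter_get_records_responses get_record_results (filter_get_records_responses get_record_results)

-- ===== LEMMAS AND PROOFS =====

theorem pv_contains_add (S : PySem.Set String) (k y : String) :
    PySem.Set.contains (PySem.Set.add S k) y = (PySem.Set.contains S y || y == k) := by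
  by_cases hy : y = k
  · subst hy
    simp [PySem.Set.contains_eq_listContains, PySem.Set.add_eq_ite]
    by_cases h : y ∈ S <;> simp [h]
  · by_cases h : k ∈ S
    · rw [PySem.Set.add_of_mem h]; simp [hy]
    · rw [PySem.Set.add_of_not_mem h]
      simp [PySem.Set.contains_eq_listContains, hy, List.contains_eq_mem]

-- discarding k commutes away against a filter whose predicate already refuses k
theorem pv_filter_discard_of_false (t : List String) (k : String) (p : String → Bool)
    (hp : p k = false) :
    (PySem.Set.discard t k).filter p = t.filter p := by
  rw [PySem.Set.discard, List.filter_filter]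
  apply List.filter_congr
  intro y _
  by_cases hy : y = k <;> simp [hy, hp]

-- discarding k before filtering ¬S = filtering ¬(S ∪ {k})
theorem pv_filter_discard_add (t : List String) (k : String) (S : PySem.Set String) :
    (PySem.Set.discard t k).filter (fun y => !PySem.Set.contains S y)
      = t.filter (fun y => !PySem.Set.contains (PySem.Set.add S k) y) := by
  rw [PySem.Set.discard, List.filter_filter]
  apply List.filter_congr
  intro y _
  rw [pv_contains_add]
  by_cases hy : y = k <;> simp [hy]

-- pass 2 of B over the already-filtered records: the emitted list is the first-occurrence
-- dedup of the keys not yet seen, each looked up in the fixed dict L.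
theorem pv_pass2 (L : PySem.Dict String (PySem.Dict String String))
    (objs : List (PySem.Dict String String)) :
    ∀ (S : PySem.Set String) (res : List (PySem.Dict String String)),
    (objs.foldl
      (fun acc obj =>
        if PySem.Set.contains acc.2 (pvKey obj) then acc
        else (acc.1 ++ [L.getD (pvKey obj) PySem.Dict.empty], PySem.Set.add acc.2 (pvKey obj)))
      (res, S)).1
    = res ++ ((PySem.Set.ofList (objs.map pvKey)).filter
        (fun k => !(PySem.Set.contains S k))).map (fun k => L.getD k PySem.Dict.empty) := by
  induction objs with
  | nil => intro S res; simp
  | cons o rest ih =>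
    intro S res
    simp only [List.map_cons, PySem.Set.ofList_cons]
    by_cases h : PySem.Set.contains S (pvKey o) = true
    · have hm : pvKey o ∈ S := (PySem.Set.contains_iff S (pvKey o)).mp h
      simp only [List.foldl_cons, h, if_true]
      rw [ih, List.filter_cons, pv_filter_discard_of_false _ _ _ (by simp [hm])]
      simp [hm]
    · have hm : pvKey o ∉ S := fun hmm => h ((PySem.Set.contains_iff S (pvKey o)).mpr hmm)
      simp only [List.foldl_cons, h, if_false, Bool.false_eq_true]
      rw [ih, List.filter_cons, pv_filter_discard_add]
      simp [hm]

-- ===== VERDICT (by name: the statement is the Claim_ definition above) =====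
theorem filter_get_records_responses_spec : Claim_equal_filter_get_records_responses := by
  intro l _
  unfold Spec_filter_get_records_responses
  unfold filter_get_records_responses filter_get_records_responses_alt
  simp only []
  -- both interior folds run over the valid records only
  rw [← List.foldl_filter, ← List.foldl_filter]
  set objs := (l.map pvRec).filter pvValid with hobjs
  set L := objs.foldl (fun d obj => d.insert (pvKey obj) obj) PySem.Dict.empty with hL
  have hnd : L.keys.Nodup := by
    rw [hL]
    exact PySem.Dict.nodup_keys_foldl_insert_key objs pvKey (fun _ o => o) _
      (by simp [PySem.Dict.keys_empty])
  rw [pv_pass2 L objs [] []]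
  rw [PySem.Dict.values_eq_map_keys L hnd PySem.Dict.empty]
  have hkeys : L.keys = PySem.Set.ofList (objs.map pvKey) := by
    rw [hL, PySem.Dict.keys_foldl_insert_key]
    simp [PySem.Dict.keys_empty, PySem.Set.update_nil_left]
  rw [hkeys]
  simp [PySem.Set.contains_eq_listContains]
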